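-- pv_equiv track=rewrite | github.com/KebabRonin/AEA | Proiect_GA/GAalgorithm.py | repair_individual
-- ===== SOURCE A (Python) =====
-- from collections import Counter
--
-- S = [{1, 2}, {2, 3, 4}, {1, 3, 4}, {4, 5}]  # Collection of subsets
--
-- node_frequencies = Counter()
--
-- def repair_individual(individual):
--     # Take the selected nodes for a certain individual by index, first index is 0 but the count of
--     # nodes starts from one, that is why we add a + 1
--     selected_nodes = {i + 1 for i, val in enumerate(individual) if val == 1}
--
--     # Take all the subsets from S that have no node in the individual
--     not_hitted_subsets = [subs for subs in S if not any(node in selected_nodes for node in subs)]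
--
--     if not not_hitted_subsets:
--         return individual  # Already valid
--
--     # we create a set with elements of the subsets that are not hitted
--     missing_nodes = set()
--     for subs in not_hitted_subsets:
--         missing_nodes.update(subs)
--
--     # Sort missing nodes by frequency (descending order)
--     sorted_nodes = sorted(missing_nodes, key=lambda x: -node_frequencies[x])
--
--     # Add nodes until all sets are hit
--     for node in sorted_nodes:
--         individual[node - 1] = 1
--         selected_nodes.add(node)
--         # check if adding the current node was enough, since
--         if all(any(node in selected_nodes for node in subs) for subs in S):
--             break
--
--     return individual
-- ===== SOURCE B (Python) =====
-- from collections import Counter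
--
-- S = [{1, 2}, {2, 3, 4}, {1, 3, 4}, {4, 5}]
--
-- node_frequencies = Counter()
--
-- def repair_individual(individual):
--     # Incremental greedy repair: hit-flags and an uncovered counter are maintained
--     # under a precomputed node -> subset-indices map, instead of re-scanning all of
--     # S after every added node.  Mutates `individual` in place, like the original.
--     selected = {i + 1 for i, val in enumerate(individual) if val == 1}
--     hit = [bool(subs & selected) for subs in S]
--     uncovered = hit.count(False)
--     if uncovered == 0:
--         return individual
--     node_subsets = {}
--     for j, subs in enumerate(S):
--         for node in subs:
--             node_subsets.setdefault(node, []).append(j)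
--     missing = {node for j, subs in enumerate(S) if not hit[j] for node in subs}
--     for node in sorted(missing, key=lambda x: -node_frequencies[x]):
--         individual[node - 1] = 1
--         for j in node_subsets[node]:
--             if not hit[j]:
--                 hit[j] = True
--                 uncovered -= 1
--         if uncovered == 0:
--             break
--     return individual
-- ===== Notes on version B (the rewrite author's own statement) =====
-- stated objective: alternative
-- what changed: Instead of re-scanning every subset of S (with its membership tests) after each added node, B precomputes hit-flags per subset, an uncovered counter and a node-to-subset-indices map once, and updates them incrementally, stopping when the counter reaches zero.
import Mathlib
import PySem

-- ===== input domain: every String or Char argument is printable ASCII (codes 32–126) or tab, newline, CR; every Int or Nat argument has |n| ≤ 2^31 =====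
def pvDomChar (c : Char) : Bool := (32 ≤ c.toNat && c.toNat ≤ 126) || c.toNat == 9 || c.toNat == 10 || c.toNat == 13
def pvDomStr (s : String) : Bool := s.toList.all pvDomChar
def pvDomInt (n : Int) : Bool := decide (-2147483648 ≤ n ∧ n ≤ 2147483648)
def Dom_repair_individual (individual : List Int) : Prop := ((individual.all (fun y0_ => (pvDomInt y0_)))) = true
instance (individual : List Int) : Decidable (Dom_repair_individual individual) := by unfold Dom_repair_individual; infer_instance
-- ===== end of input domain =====

-- B replaces A's full re-scan of S after every added node by hit-flags, an uncovered counter and a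
-- precomputed node -> subset-indices map, updated incrementally (objective: alternative; equivalence
-- is about the RETURN value — the Python A and B both also mutate `individual` in place, identically).

-- ===== PORT A =====
-- S = [{1, 2}, {2, 3, 4}, {1, 3, 4}, {4, 5}]  (module constant; literal sets of distinct ints)
def pvS : List (List Int) := [[1, 2], [2, 3, 4], [1, 3, 4], [4, 5]]

-- the 'for node in sorted_nodes: … break' loop of A
def pvHitLoopA (sel : PySem.Set Int) (nodes : List Int) (ind : List Int) : List Int :=
  match nodes with
  | [] => ind
  | node :: rest =>
    let ind' := PySem.List.pySetD ind (node - 1) 1   -- individual[node-1] = 1 (in range under Pre_)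
    let sel' := PySem.Set.add sel node
    if pvS.all (fun subs => subs.any (fun m => PySem.Set.contains sel' m)) then ind'
    else pvHitLoopA sel' rest ind'

def repair_individual (individual : List Int) : List Int :=
  let selected : PySem.Set Int := PySem.Set.ofList
    ((PySem.List.enumerate individual).filterMap (fun p => if p.2 = 1 then some (p.1 + 1) else none))
  let not_hitted := pvS.filter (fun subs => !(subs.any (fun m => PySem.Set.contains selected m)))
  if not_hitted.isEmpty then individual
  else
    let missing := not_hitted.foldl (fun s subs => PySem.Set.update s subs) PySem.Set.empty
    -- sorted(missing_nodes, key=lambda x: -node_frequencies[x]): node_frequencies is the empty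
    -- Counter, so the key is constantly 0 and the stable sort returns CPython's iteration order
    -- of the set missing_nodes; for ints from {1..5} (hash = identity, table size 8) that order
    -- is ascending value — the hand port by an ascending sort is exact here.
    let sorted_nodes := PySem.List.sorted missing (fun x => x) false
    pvHitLoopA selected sorted_nodes individual

-- ===== PORT B =====
-- node_subsets: for each node, the indices j of the subsets of S containing it (setdefault/append)
def pvNodeSubsets : PySem.Dict Int (List Int) :=
  (PySem.List.enumerate pvS).foldl
    (fun d p => p.2.foldl (fun d' node => d'.insert node (d'.getD node [] ++ [p.1])) d)
    PySem.Dict.empty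

-- B's loop: write the node, mark its subsets hit, decrement `uncovered` per newly hit subset
def pvRepairLoopB (ind : List Int) (hit : List Bool) (uncovered : Int) (nodes : List Int) : List Int :=
  match nodes with
  | [] => ind
  | node :: rest =>
    let ind' := PySem.List.pySetD ind (node - 1) 1   -- individual[node-1] = 1 (in range under Pre_)
    let st := (pvNodeSubsets.getD node []).foldl
      (fun (p : List Bool × Int) j =>
        if p.1.getD j.toNat true then p else (p.1.set j.toNat true, p.2 - 1))
      (hit, uncovered)
    if st.2 = 0 then ind' else pvRepairLoopB ind' st.1 st.2 rest

def repair_individual_alt (individual : List Int) : List Int :=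
  let selected : PySem.Set Int := PySem.Set.ofList
    ((PySem.List.enumerate individual).filterMap (fun p => if p.2 = 1 then some (p.1 + 1) else none))
  let hit := pvS.map (fun subs => !(PySem.Set.inter (PySem.Set.ofList subs) selected).isEmpty)
  let uncovered : Int := (hit.count false : Nat)
  if uncovered = 0 then individual
  else
    let missing := (PySem.List.enumerate pvS).foldl
      (fun s p => if hit.getD p.1.toNat false then s else PySem.Set.update s p.2)
      PySem.Set.empty
    -- same CPython note as in port A: the constant-key sorted of this set of ints from {1..5}
    -- is the ascending order — exact here.
    let sorted_nodes := PySem.List.sorted missing (fun x => x) false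
    pvRepairLoopB individual hit uncovered sorted_nodes

-- ===== PRECONDITION & SPEC =====
-- Pre_ excludes exactly the lists of length ≤ 3: there the subset {4,5} can never be hit, both
-- the Python A and the Python B reach the write individual[3] = 1 and raise IndexError.
def Pre_repair_individual (individual : List Int) : Prop := 4 ≤ individual.length
instance (individual : List Int) : Decidable (Pre_repair_individual individual) := by
  unfold Pre_repair_individual; infer_instance
def pvWitness_repair_individual : List Int := [0, 1, 0, 0]
def Spec_repair_individual (individual : List Int) (out : List Int) : Prop :=
  out = repair_individual_alt individual
instance (individual : List Int) (out : List Int) : Decidable (Spec_repair_individual individual out) := by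
  unfold Spec_repair_individual; infer_instance

-- ===== CLAIM (what is proved, stated in full; the proofs are below) =====
def Claim_equal_repair_individual : Prop := ∀ (individual : List Int),
  Dom_repair_individual individual → Pre_repair_individual individual →
  Spec_repair_individual individual (repair_individual individual)

-- ===== LEMMAS AND PROOFS =====

-- the hit-vector of a selection, over the fixed pvS
def pvF (sel : PySem.Set Int) : List Bool :=
  pvS.map (fun subs => subs.any (fun m => PySem.Set.contains sel m))

theorem pv_nodeSubsets_eq :
    pvNodeSubsets = PySem.Dict.mk [(1, [0, 2]), (2, [0, 1]), (3, [1, 2]), (4, [1, 2, 3]), (5, [3])] := by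
  rfl

theorem pv_js1 : pvNodeSubsets.getD 1 [] = [0, 2] := by rfl
theorem pv_js2 : pvNodeSubsets.getD 2 [] = [0, 1] := by rfl
theorem pv_js3 : pvNodeSubsets.getD 3 [] = [1, 2] := by rfl
theorem pv_js4 : pvNodeSubsets.getD 4 [] = [1, 2, 3] := by rfl
theorem pv_js5 : pvNodeSubsets.getD 5 [] = [3] := by rfl

theorem pv_js_other (node : Int) (h1 : node ≠ 1) (h2 : node ≠ 2) (h3 : node ≠ 3)
    (h4 : node ≠ 4) (h5 : node ≠ 5) : pvNodeSubsets.getD node [] = [] := by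
  rw [pv_nodeSubsets_eq]
  simp [PySem.Dict.getD, Ne.symm h1, Ne.symm h2, Ne.symm h3, Ne.symm h4, Ne.symm h5, PySem.Dict.get?]

set_option maxHeartbeats 1000000 in
theorem pv_step (sel : PySem.Set Int) (node : Int) :
    (pvNodeSubsets.getD node []).foldl
      (fun (p : List Bool × Int) j => if p.1.getD j.toNat true then p else (p.1.set j.toNat true, p.2 - 1))
      (pvF sel, ((pvF sel).count false : Nat))
    = (pvF (PySem.Set.add sel node), (((pvF (PySem.Set.add sel node)).count false : Nat) : Int)) := by
  by_cases e1 : node = 1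
  · subst e1
    rw [pv_js1]
    cases hc1 : decide ((1 : Int) ∈ sel) <;> cases hc2 : decide ((2 : Int) ∈ sel) <;>
    cases hc3 : decide ((3 : Int) ∈ sel) <;> cases hc4 : decide ((4 : Int) ∈ sel) <;>
    cases hc5 : decide ((5 : Int) ∈ sel) <;>
      simp [pvF, pvS, PySem.Set.mem_add, PySem.Set.contains, hc1, hc2, hc3, hc4, hc5]
  by_cases e2 : node = 2
  · subst e2
    rw [pv_js2]
    cases hc1 : decide ((1 : Int) ∈ sel) <;> cases hc2 : decide ((2 : Int) ∈ sel) <;>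
    cases hc3 : decide ((3 : Int) ∈ sel) <;> cases hc4 : decide ((4 : Int) ∈ sel) <;>
    cases hc5 : decide ((5 : Int) ∈ sel) <;>
      simp [pvF, pvS, PySem.Set.mem_add, PySem.Set.contains, hc1, hc2, hc3, hc4, hc5]
  by_cases e3 : node = 3
  · subst e3
    rw [pv_js3]
    cases hc1 : decide ((1 : Int) ∈ sel) <;> cases hc2 : decide ((2 : Int) ∈ sel) <;>
    cases hc3 : decide ((3 : Int) ∈ sel) <;> cases hc4 : decide ((4 : Int) ∈ sel) <;>
    cases hc5 : decide ((5 : Int) ∈ sel) <;>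
      simp [pvF, pvS, PySem.Set.mem_add, PySem.Set.contains, hc1, hc2, hc3, hc4, hc5]
  by_cases e4 : node = 4
  · subst e4
    rw [pv_js4]
    cases hc1 : decide ((1 : Int) ∈ sel) <;> cases hc2 : decide ((2 : Int) ∈ sel) <;>
    cases hc3 : decide ((3 : Int) ∈ sel) <;> cases hc4 : decide ((4 : Int) ∈ sel) <;>
    cases hc5 : decide ((5 : Int) ∈ sel) <;>
      simp [pvF, pvS, PySem.Set.mem_add, PySem.Set.contains, hc1, hc2, hc3, hc4, hc5]
  by_cases e5 : node = 5
  · subst e5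
    rw [pv_js5]
    cases hc1 : decide ((1 : Int) ∈ sel) <;> cases hc2 : decide ((2 : Int) ∈ sel) <;>
    cases hc3 : decide ((3 : Int) ∈ sel) <;> cases hc4 : decide ((4 : Int) ∈ sel) <;>
    cases hc5 : decide ((5 : Int) ∈ sel) <;>
      simp [pvF, pvS, PySem.Set.mem_add, PySem.Set.contains, hc1, hc2, hc3, hc4, hc5]
  rw [pv_js_other node e1 e2 e3 e4 e5]
  simp [pvF, pvS, PySem.Set.mem_add, PySem.Set.contains,
    Ne.symm e1, Ne.symm e2, Ne.symm e3, Ne.symm e4, Ne.symm e5]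

theorem pv_cond (sel : PySem.Set Int) :
    (pvS.all (fun subs => subs.any (fun m => PySem.Set.contains sel m)) = true)
      ↔ ((pvF sel).count false = 0) := by
  cases hc1 : decide ((1 : Int) ∈ sel) <;> cases hc2 : decide ((2 : Int) ∈ sel) <;>
  cases hc3 : decide ((3 : Int) ∈ sel) <;> cases hc4 : decide ((4 : Int) ∈ sel) <;>
  cases hc5 : decide ((5 : Int) ∈ sel) <;>
    simp [pvF, pvS, PySem.Set.contains, hc1, hc2, hc3, hc4, hc5]

theorem pv_hit_eq (sel : PySem.Set Int) :
    pvS.map (fun subs => !(PySem.Set.inter (PySem.Set.ofList subs) sel).isEmpty) = pvF sel := by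
  cases hc1 : decide ((1 : Int) ∈ sel) <;> cases hc2 : decide ((2 : Int) ∈ sel) <;>
  cases hc3 : decide ((3 : Int) ∈ sel) <;> cases hc4 : decide ((4 : Int) ∈ sel) <;>
  cases hc5 : decide ((5 : Int) ∈ sel) <;>
    simp [pvF, pvS, PySem.Set.inter, PySem.Set.ofList, PySem.Set.contains, hc1, hc2, hc3, hc4, hc5]

theorem pv_empty_iff (sel : PySem.Set Int) :
    ((pvS.filter (fun subs => !(subs.any (fun m => PySem.Set.contains sel m)))).isEmpty = true)
      ↔ ((pvF sel).count false = 0) := by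
  cases hc1 : decide ((1 : Int) ∈ sel) <;> cases hc2 : decide ((2 : Int) ∈ sel) <;>
  cases hc3 : decide ((3 : Int) ∈ sel) <;> cases hc4 : decide ((4 : Int) ∈ sel) <;>
  cases hc5 : decide ((5 : Int) ∈ sel) <;>
    simp [pvF, pvS, PySem.Set.contains, hc1, hc2, hc3, hc4, hc5]

theorem pv_missing_eq (sel : PySem.Set Int) :
    (PySem.List.enumerate pvS).foldl
      (fun s p => if (pvF sel).getD p.1.toNat false then s else PySem.Set.update s p.2)
      PySem.Set.empty
    = (pvS.filter (fun subs => !(subs.any (fun m => PySem.Set.contains sel m)))).foldl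
        (fun s subs => PySem.Set.update s subs) PySem.Set.empty := by
  cases hc1 : decide ((1 : Int) ∈ sel) <;> cases hc2 : decide ((2 : Int) ∈ sel) <;>
  cases hc3 : decide ((3 : Int) ∈ sel) <;> cases hc4 : decide ((4 : Int) ∈ sel) <;>
  cases hc5 : decide ((5 : Int) ∈ sel) <;>
    simp [pvF, pvS, PySem.List.enumerate, PySem.Set.contains, hc1, hc2, hc3, hc4, hc5]

theorem pv_loop_eq : ∀ (nodes : List Int) (sel : PySem.Set Int) (ind : List Int) (hit : List Bool) (unc : Int),
    hit = pvF sel → unc = ((hit.count false : Nat) : Int) →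
    pvRepairLoopB ind hit unc nodes = pvHitLoopA sel nodes ind := by
  intro nodes
  induction nodes with
  | nil => intro sel ind hit unc h1 h2; rfl
  | cons node rest ih =>
    intro sel ind hit unc h1 h2
    subst h1; subst h2
    simp only [pvRepairLoopB, pvHitLoopA]
    rw [pv_step]
    by_cases hz : ((pvF (PySem.Set.add sel node)).count false) = 0
    · rw [if_pos (show ((pvF (PySem.Set.add sel node), (((pvF (PySem.Set.add sel node)).count false : Nat) : Int)).2 = 0) by simpa using hz),
         if_pos ((pv_cond (PySem.Set.add sel node)).mpr hz)]
    · rw [if_neg (show ¬((pvF (PySem.Set.add sel node), (((pvF (PySem.Set.add sel node)).count false : Nat) : Int)).2 = 0) by simpa using hz),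
         if_neg (fun h => hz ((pv_cond (PySem.Set.add sel node)).mp h))]
      exact ih (PySem.Set.add sel node) _ _ _ rfl rfl

-- ===== VERDICT (by name: the statement is the Claim_ definition above) =====
theorem repair_individual_spec : Claim_equal_repair_individual := by
  intro ind _ _
  unfold Spec_repair_individual repair_individual repair_individual_alt
  simp only [pv_hit_eq]
  by_cases hz : ((pvF (PySem.Set.ofList ((PySem.List.enumerate ind).filterMap
      (fun p => if p.2 = 1 then some (p.1 + 1) else none)))).count false) = 0
  · rw [if_pos ((pv_empty_iff _).mpr hz), if_pos (by exact_mod_cast hz)]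
  · rw [if_neg (fun h => hz ((pv_empty_iff _).mp h)), if_neg (by exact_mod_cast hz)]
    rw [pv_missing_eq]
    exact (pv_loop_eq _ _ _ _ _ rfl rfl).symm
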